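-- pv_equiv track=rewrite | github.com/i-swathinayak/Natural-Language-Processing | Hidden Markov Model Part-of-Speech Tagger/hmmlearn3.py | compute_transition_count
-- ===== SOURCE A (Python) =====
-- from heapq import nlargest
--
-- def compute_transition_count(train_data):
--     transition_count = {}
--     tag_count = {}
--     line_count = 0
--     for line in train_data:
--         line_count += 1;
--         data = line.split()
--         m = len(data)
--         for i in range(0, m):
--             tag_list = data[i].rsplit('/',1)
--             tag = tag_list[1]
--             transition_count[tag] = transition_count.get(tag, 0) + 1
--     tag_count=dict(transition_count)
--     top_tags = nlargest(8, tag_count, key=tag_count.get)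
--     top_tag={}
--     count=8
--     for tag in top_tags:
--         top_tag[tag] = count
--         count-=1
--     transition_count["q0"] = line_count
--     tag_count["q1"] = 0
--     return transition_count, tag_count, top_tag
-- ===== SOURCE B (Python) =====
-- from collections import Counter
--
--
-- def compute_transition_count(train_data):
--     counts = Counter(tok.rsplit('/', 1)[1]
--                      for line in train_data for tok in line.split())
--     top_tags = sorted(counts, key=counts.get, reverse=True)[:8]
--     top_tag = {t: 8 - i for i, t in enumerate(top_tags)}
--     transition_count = dict(counts)
--     transition_count["q0"] = len(train_data)
--     tag_count = dict(counts)
--     tag_count["q1"] = 0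
--     return transition_count, tag_count, top_tag
-- ===== Notes on version B (the rewrite author's own statement) =====
-- stated objective: idiomatic
-- what changed: The hand-rolled nested counting loops with dict.get bookkeeping become a single collections.Counter over the flattened token stream, heapq.nlargest is replaced by a stable reverse sort sliced to 8, and the countdown labelling loop becomes an enumerate dict comprehension.
-- outside the precondition, e.g. on compute_transition_count(['dog cat/NN']): A raises IndexError, B raises IndexError
import Mathlib
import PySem

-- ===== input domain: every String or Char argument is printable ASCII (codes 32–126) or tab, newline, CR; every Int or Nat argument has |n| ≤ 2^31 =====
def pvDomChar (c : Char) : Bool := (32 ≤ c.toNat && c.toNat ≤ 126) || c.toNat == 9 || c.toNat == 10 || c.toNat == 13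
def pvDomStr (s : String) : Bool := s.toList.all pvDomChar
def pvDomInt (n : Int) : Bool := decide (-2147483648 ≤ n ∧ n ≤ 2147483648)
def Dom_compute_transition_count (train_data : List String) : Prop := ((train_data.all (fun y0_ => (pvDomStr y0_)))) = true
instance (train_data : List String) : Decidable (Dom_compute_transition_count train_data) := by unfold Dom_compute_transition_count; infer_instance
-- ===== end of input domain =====

-- B replaces A's hand-rolled nested counting loops by one Counter over the flattened
-- token stream and heapq.nlargest by a stable reverse sort with an enumerate
-- comprehension for the rank labels (objective: more idiomatic; same cost).

-- ===== PORT A =====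

-- tok.rsplit('/', 1)[1]: the part after the LAST '/'. Exact whenever '/' occurs in
-- the token (guaranteed by Pre_); on a token without '/', Python raises IndexError.
def pvAfterLastSlash (s : String) : String :=
  String.ofList ((s.toList.reverse.takeWhile (fun c => c ≠ '/')).reverse)

def compute_transition_count (train_data : List String) :
    (List (String × Int)) × (List (String × Int)) × (List (String × Int)) :=
  -- for line in train_data: line_count += 1; for i in range(0, m): count tag of data[i]
  let st := train_data.foldl
    (fun (st : PySem.Dict String Int × Int) line =>
      let line_count := st.2 + 1
      let data := PySem.Str.split₀ line
      let m : Int := (data.length : Int)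
      let d := (PySem.List.pyRange 0 m 1).foldl
        (fun (d : PySem.Dict String Int) i =>
          let tok := PySem.List.pyGetD data i ""   -- data[i]; i ∈ range(0, m) is always in range: exact
          let tag := pvAfterLastSlash tok
          d.insert tag (d.getD tag 0 + 1)) st.1
      (d, line_count))
    (PySem.Dict.empty, 0)
  let transition_count := st.1
  let line_count := st.2
  let tag_count := transition_count                 -- tag_count = dict(transition_count)
  -- nlargest(8, tag_count, key=tag_count.get): CPython's documented equivalent
  -- sorted(iterable, key=key, reverse=True)[:8]; every iterated key is present, so .get = getD _ 0
  let top_tags := (PySem.List.sorted tag_count.keys (fun t => tag_count.getD t 0) true).take 8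
  let top_tag := (top_tags.foldl
    (fun (st : PySem.Dict String Int × Int) tag => (st.1.insert tag st.2, st.2 - 1))
    (PySem.Dict.empty, 8)).1
  let transition_count := transition_count.insert "q0" line_count
  let tag_count := tag_count.insert "q1" 0
  (transition_count.items, tag_count.items, top_tag.items)

-- ===== PORT B =====

def compute_transition_count_alt (train_data : List String) :
    (List (String × Int)) × (List (String × Int)) × (List (String × Int)) :=
  -- counts = Counter(tok.rsplit('/', 1)[1] for line in train_data for tok in line.split())
  let counts := PySem.Dict.counter
    ((train_data.flatMap (fun line => PySem.Str.split₀ line)).map pvAfterLastSlash)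
  -- sorted(counts, key=counts.get, reverse=True)[:8]
  let top_tags := (PySem.List.sorted counts.keys (fun t => counts.getD t 0) true).take 8
  -- {t: 8 - i for i, t in enumerate(top_tags)}
  let top_tag := (PySem.List.enumerate top_tags 0).foldl
    (fun (d : PySem.Dict String Int) p => d.insert p.2 (8 - p.1)) PySem.Dict.empty
  let transition_count := counts.insert "q0" (train_data.length : Int)
  let tag_count := counts.insert "q1" 0
  (transition_count.items, tag_count.items, top_tag.items)

-- ===== PRECONDITION & SPEC =====
-- Pre_ excludes exactly the inputs with a whitespace-separated token containing no '/':
-- there A (and B alike) raises IndexError on rsplit('/', 1)[1].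
def Pre_compute_transition_count (train_data : List String) : Prop :=
  ∀ line ∈ train_data, ∀ tok ∈ PySem.Str.split₀ line, '/' ∈ tok.toList
instance (train_data : List String) : Decidable (Pre_compute_transition_count train_data) := by
  unfold Pre_compute_transition_count; infer_instance

def pvWitness_compute_transition_count : List String := ["The/DT dog/NN ran/VB", "a/DT"]

def Spec_compute_transition_count (train_data : List String) (out : (List (String × Int)) × (List (String × Int)) × (List (String × Int))) : Prop := out = compute_transition_count_alt train_data
instance (train_data : List String) (out : (List (String × Int)) × (List (String × Int)) × (List (String × Int))) : Decidable (Spec_compute_transition_count train_data out) := by unfold Spec_compute_transition_count; infer_instance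

-- ===== CLAIM (what is proved, stated in full; the proofs are below) =====
def Claim_equal_compute_transition_count : Prop := ∀ (train_data : List String), Dom_compute_transition_count train_data → Pre_compute_transition_count train_data → Spec_compute_transition_count train_data (compute_transition_count train_data)

-- ===== LEMMAS AND PROOFS =====

-- A's line loop carries (dict, line counter); the counter ends at init + length and the
-- dict is a single fold of tag inserts over the flattened token list.
theorem pv_count_loop (ls : List String) (d : PySem.Dict String Int) (n : Int) :
    ls.foldl
      (fun (st : PySem.Dict String Int × Int) line =>
        let line_count := st.2 + 1
        let data := PySem.Str.split₀ line
        let m : Int := (data.length : Int)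
        let d := (PySem.List.pyRange 0 m 1).foldl
          (fun (d : PySem.Dict String Int) i =>
            let tok := PySem.List.pyGetD data i ""
            let tag := pvAfterLastSlash tok
            d.insert tag (d.getD tag 0 + 1)) st.1
        (d, line_count)) (d, n)
    = ((ls.flatMap (fun line => PySem.Str.split₀ line)).foldl
        (fun (d : PySem.Dict String Int) tok =>
          let tag := pvAfterLastSlash tok
          d.insert tag (d.getD tag 0 + 1)) d,
       n + ls.length) := by
  induction ls generalizing d n with
  | nil => simp
  | cons l t ih =>
    simp only [List.foldl_cons, List.flatMap_cons, List.foldl_append]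
    rw [ih]
    rw [PySem.List.foldl_pyRange_zero_pyGetD' (PySem.Str.split₀ l) ""
      (fun (d : PySem.Dict String Int) tok =>
        d.insert (pvAfterLastSlash tok) (d.getD (pvAfterLastSlash tok) 0 + 1)) d]
    simp only [Prod.mk.injEq]
    exact ⟨trivial, by simp only [List.length_cons]; push_cast; ring⟩

-- A's countdown labelling loop equals B's enumerate fold, at any offset.
theorem pv_label_loop (l : List String) (d : PySem.Dict String Int) (k : Int) :
    (l.foldl (fun (st : PySem.Dict String Int × Int) tag => (st.1.insert tag st.2, st.2 - 1))
      (d, 8 - k)).1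
    = (PySem.List.enumerate l k).foldl
        (fun (d : PySem.Dict String Int) p => d.insert p.2 (8 - p.1)) d := by
  induction l generalizing d k with
  | nil => simp [PySem.List.enumerate_nil]
  | cons x t ih =>
    rw [PySem.List.enumerate_cons]
    simp only [List.foldl_cons]
    have : 8 - k - 1 = 8 - (k + 1) := by ring
    rw [this, ih]

-- ===== VERDICT (by name: the statement is the Claim_ definition above) =====
theorem compute_transition_count_spec : Claim_equal_compute_transition_count := by
  intro train_data _ _
  unfold Spec_compute_transition_count compute_transition_count compute_transition_count_alt
  simp only [pv_count_loop]
  rw [show ((train_data.flatMap (fun line => PySem.Str.split₀ line)).foldl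
        (fun (d : PySem.Dict String Int) tok =>
          let tag := pvAfterLastSlash tok
          d.insert tag (d.getD tag 0 + 1)) PySem.Dict.empty)
      = PySem.Dict.counter
          ((train_data.flatMap (fun line => PySem.Str.split₀ line)).map pvAfterLastSlash) from by
    rw [← PySem.Dict.foldl_insert_getD_add_one_eq_counter, List.foldl_map]]
  rw [show (8 : Int) = 8 - 0 from rfl, pv_label_loop]
  simp
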